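-- pv_equiv track=rewrite | github.com/KonstFed/DiffIE | src/diffopenie/evaluation/carb_metrics.py | _word_match_score
-- ===== SOURCE A (Python) =====
-- def _word_match_score(
--     gold_words: list[str], pred_words: list[str]
-- ) -> tuple[int, int, int]:
--     """Returns (matching, len_gold, len_pred) with greedy word matching."""
--     pred_remaining = list(pred_words)
--     matching = 0
--     for w in gold_words:
--         if w in pred_remaining:
--             matching += 1
--             pred_remaining.remove(w)
--     return matching, len(gold_words), len(pred_words)
-- ===== SOURCE B (Python) =====
-- def _word_match_score(
--     gold_words: list[str], pred_words: list[str]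
-- ) -> tuple[int, int, int]:
--     """Returns (matching, len_gold, len_pred) via sort + two-pointer merge."""
--     g = sorted(gold_words)
--     p = sorted(pred_words)
--     matching = 0
--     i = 0
--     j = 0
--     while i < len(g) and j < len(p):
--         if g[i] == p[j]:
--             matching += 1
--             i += 1
--             j += 1
--         elif g[i] < p[j]:
--             i += 1
--         else:
--             j += 1
--     return matching, len(gold_words), len(pred_words)
-- ===== Notes on version B (the rewrite author's own statement) =====
-- stated objective: faster
-- what changed: Replaced the greedy loop doing a linear membership test and list.remove per gold word (O(n*m)) with sort-then-two-pointer merge counting equal elements on sorted copies (O(n log n + m log m)).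
import Mathlib
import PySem

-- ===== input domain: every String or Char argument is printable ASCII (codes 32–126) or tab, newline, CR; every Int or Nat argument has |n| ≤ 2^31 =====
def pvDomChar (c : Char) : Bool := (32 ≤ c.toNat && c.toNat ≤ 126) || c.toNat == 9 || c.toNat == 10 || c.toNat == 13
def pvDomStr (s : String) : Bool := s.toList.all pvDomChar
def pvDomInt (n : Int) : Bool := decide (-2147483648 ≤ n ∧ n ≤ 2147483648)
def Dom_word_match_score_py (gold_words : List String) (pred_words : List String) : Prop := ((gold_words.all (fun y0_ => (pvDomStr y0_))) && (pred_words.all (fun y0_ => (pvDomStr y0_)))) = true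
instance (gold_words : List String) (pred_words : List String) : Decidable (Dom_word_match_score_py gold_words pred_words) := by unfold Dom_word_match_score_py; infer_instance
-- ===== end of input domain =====

-- B replaces A's greedy membership-test-and-remove loop by sort + two-pointer merge (faster).
-- Neither implementation mutates its arguments (A copies pred_words first; B sorts copies).

-- ===== PORT A =====
-- A's loop state: (pred_remaining, matching); 'w in pred_remaining' then 'pred_remaining.remove(w)'.
def word_match_score_py (gold_words : List String) (pred_words : List String) : Int × Int × Int :=
  let st := gold_words.foldl
    (fun (st : List String × Int) w =>
      if w ∈ st.1 then ((PySem.List.remove? st.1 w).getD st.1, st.2 + 1) else st)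
    (pred_words, 0)
  (st.2, (gold_words.length : Int), (pred_words.length : Int))

-- ===== PORT B =====
-- the two-pointer walk of Source B, as recursion on the (sorted) lists
def wmsMerge : List String → List String → Int
  | x :: g, y :: p =>
    if x = y then wmsMerge g p + 1
    else if x < y then wmsMerge g (y :: p)
    else wmsMerge (x :: g) p
  | _, _ => 0
termination_by g p => g.length + p.length

def word_match_score_py_alt (gold_words : List String) (pred_words : List String) : Int × Int × Int :=
  (wmsMerge (PySem.List.sorted gold_words (fun x => x) false)
            (PySem.List.sorted pred_words (fun x => x) false),
   (gold_words.length : Int), (pred_words.length : Int))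

-- ===== PRECONDITION & SPEC =====
def Spec_word_match_score_py (gold_words : List String) (pred_words : List String) (out : Int × Int × Int) : Prop := out = word_match_score_py_alt gold_words pred_words
instance (gold_words : List String) (pred_words : List String) (out : Int × Int × Int) : Decidable (Spec_word_match_score_py gold_words pred_words out) := by unfold Spec_word_match_score_py; infer_instance

-- ===== CLAIM (what is proved, stated in full; the proofs are below) =====
def Claim_equal_word_match_score_py : Prop := ∀ (gold_words : List String) (pred_words : List String), Dom_word_match_score_py gold_words pred_words → Spec_word_match_score_py gold_words pred_words (word_match_score_py gold_words pred_words)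

-- ===== LEMMAS AND PROOFS =====

-- A's loop computes the multiset-intersection cardinality.
theorem wms_foldl_eq_inter_card (gold : List String) :
    ∀ (pred : List String) (m : Int),
      (gold.foldl
        (fun (st : List String × Int) w =>
          if w ∈ st.1 then ((PySem.List.remove? st.1 w).getD st.1, st.2 + 1) else st)
        (pred, m)).2
      = m + (((gold : Multiset String) ∩ (pred : Multiset String)).card : Int) := by
  induction gold with
  | nil => intro pred m; simp
  | cons w g ih =>
    intro pred m
    by_cases hw : w ∈ pred
    · simp only [List.foldl_cons, if_pos hw, PySem.List.remove?_eq_some_erase pred w hw,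
        Option.getD_some]
      rw [ih, ← Multiset.cons_coe,
        Multiset.cons_inter_of_pos _ (Multiset.mem_coe.mpr hw),
        Multiset.coe_erase, Multiset.card_cons]
      push_cast; ring
    · simp only [List.foldl_cons, if_neg hw]
      rw [ih, ← Multiset.cons_coe,
        Multiset.cons_inter_of_neg _ (fun h => hw (Multiset.mem_coe.mp h))]

-- B's merge on sorted lists computes the same cardinality.
theorem wmsMerge_eq_inter_card :
    ∀ (g p : List String), g.Pairwise (· ≤ ·) → p.Pairwise (· ≤ ·) →
      wmsMerge g p = (((g : Multiset String) ∩ (p : Multiset String)).card : Int) := by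
  intro g p
  induction g, p using wmsMerge.induct with
  | case1 g y p ih =>
    intro hg hp
    rw [wmsMerge]
    simp only [if_true]
    rw [ih hg.of_cons hp.of_cons, ← Multiset.cons_coe, ← Multiset.cons_coe,
      Multiset.cons_inter_of_pos _ (Multiset.mem_cons_self y _),
      Multiset.erase_cons_head, Multiset.card_cons]
    push_cast; ring
  | case2 x g y p hne hlt ih =>
    intro hg hp
    rw [wmsMerge]
    simp only [if_neg hne, if_pos hlt]
    rw [ih hg.of_cons hp]
    have hx : x ∉ ((y :: p : List String) : Multiset String) := by
      intro hmem
      have hyx : y ≤ x := by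
        rcases List.mem_cons.mp (Multiset.mem_coe.mp hmem) with h | h
        · exact h.symm.le
        · exact (List.pairwise_cons.mp hp).1 x h
      exact absurd hlt (not_lt.mpr hyx)
    rw [show ((x :: g : List String) : Multiset String) ∩ ((y :: p : List String) : Multiset String)
          = ((g : List String) : Multiset String) ∩ ((y :: p : List String) : Multiset String) from by
        rw [← Multiset.cons_coe x g, Multiset.cons_inter_of_neg _ hx]]
  | case3 x g y p hne hnlt ih =>
    intro hg hp
    rw [wmsMerge]
    simp only [if_neg hne, if_neg hnlt]
    rw [ih hg hp.of_cons]
    have hy : y ∉ ((x :: g : List String) : Multiset String) := by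
      intro hmem
      rcases List.mem_cons.mp (Multiset.mem_coe.mp hmem) with h | h
      · exact hne h.symm
      · exact hnlt (lt_of_le_of_ne ((List.pairwise_cons.mp hg).1 y h) hne)
    rw [show ((x :: g : List String) : Multiset String) ∩ ((y :: p : List String) : Multiset String)
          = ((x :: g : List String) : Multiset String) ∩ ((p : List String) : Multiset String) from by
        rw [← Multiset.cons_coe y p, Multiset.inter_comm, Multiset.cons_inter_of_neg _ hy,
          Multiset.inter_comm]]
  | case4 g p h =>
    intro _ _
    cases g with
    | nil => rw [wmsMerge.eq_def]; simp
    | cons x g =>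
      cases p with
      | nil => rw [wmsMerge.eq_def]; simp
      | cons y p => exact absurd rfl (fun hh => h x g y p rfl hh)

-- ===== VERDICT (by name: the statement is the Claim_ definition above) =====
theorem word_match_score_py_spec : Claim_equal_word_match_score_py := by
  intro gold pred _
  unfold Spec_word_match_score_py word_match_score_py word_match_score_py_alt
  have hA := wms_foldl_eq_inter_card gold pred 0
  have hg := PySem.List.sorted_pairwise (xs := gold) (key := fun x : String => x)
  have hp := PySem.List.sorted_pairwise (xs := pred) (key := fun x : String => x)
  have hB := wmsMerge_eq_inter_card _ _ hg hp
  have hgm : ((PySem.List.sorted gold (fun x => x) false : List String) : Multiset String)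
      = (gold : Multiset String) := Multiset.coe_eq_coe.mpr (PySem.List.sorted_perm _ _ _)
  have hpm : ((PySem.List.sorted pred (fun x => x) false : List String) : Multiset String)
      = (pred : Multiset String) := Multiset.coe_eq_coe.mpr (PySem.List.sorted_perm _ _ _)
  rw [hgm, hpm] at hB
  simp only [hA, hB, zero_add]
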